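-- pv_equiv track=rewrite | github.com/fangyinjie/Main_Project | DAG Generator And Simulator/Src/DAG_Generator/paper/1_new_DAG_Enum.py | shape_enumator
-- ===== SOURCE A (Python) =====
-- import copy
--
-- def shape_enumator(node_num, last_shape_num_list):
--     reset_node_num = node_num - sum(last_shape_num_list)
--     assert reset_node_num > 0
--     if reset_node_num == 1:
--         temp_new_last_shape_num_list = copy.deepcopy(last_shape_num_list)
--         temp_new_last_shape_num_list.append(1)
--         return [temp_new_last_shape_num_list]
--     else:
--         ret_list = []
--         for slevel_node_num in range(1, reset_node_num):
--             temp_new_last_shape_num_list = copy.deepcopy(last_shape_num_list)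
--             temp_new_last_shape_num_list.append(slevel_node_num)
--             ret_list += shape_enumator(node_num, temp_new_last_shape_num_list)
--         return ret_list
-- ===== SOURCE B (Python) =====
-- def shape_enumator(node_num, last_shape_num_list):
--     assert node_num - sum(last_shape_num_list) > 0
--     out = []
--     stack = [list(last_shape_num_list)]
--     while stack:
--         entry = stack.pop()
--         remaining = node_num - sum(entry)
--         if remaining == 1:
--             out.append(entry + [1])
--         else:
--             for slevel in reversed(range(1, remaining)):
--                 stack.append(entry + [slevel])
--     return out
-- ===== Notes on version B (the rewrite author's own statement) =====
-- stated objective: alternative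
-- what changed: A's recursive DFS with per-level list rebuilding is replaced by an explicit LIFO stack loop that pushes child prefixes in reverse and emits completed compositions in pop order; same output in the same order.
import Mathlib
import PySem

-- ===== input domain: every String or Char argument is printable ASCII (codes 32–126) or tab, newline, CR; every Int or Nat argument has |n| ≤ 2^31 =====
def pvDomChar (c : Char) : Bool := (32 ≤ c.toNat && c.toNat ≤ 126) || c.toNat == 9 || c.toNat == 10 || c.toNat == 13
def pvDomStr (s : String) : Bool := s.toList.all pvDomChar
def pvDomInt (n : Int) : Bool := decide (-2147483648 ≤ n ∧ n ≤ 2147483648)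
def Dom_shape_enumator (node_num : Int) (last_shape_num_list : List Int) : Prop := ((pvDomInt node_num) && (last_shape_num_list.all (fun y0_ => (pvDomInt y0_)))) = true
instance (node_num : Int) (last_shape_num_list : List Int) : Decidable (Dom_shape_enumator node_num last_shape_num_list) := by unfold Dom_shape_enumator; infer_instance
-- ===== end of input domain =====

-- B replaces A's recursion by an explicit LIFO stack (children pushed in reverse),
-- emitting completed compositions in pop order; objective: alternative decomposition, same values.

-- B replaces A's recursion by an explicit LIFO stack loop (children pushed in reverse),
-- emitting completed compositions in pop order; objective: alternative decomposition, same values.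

-- ===== PORT A =====
-- literal port of A's recursion; the fuel parameter only makes the recursion structural
-- (it never runs out on the executions A performs: each call strictly shrinks node_num - sum)
def shape_enumator_go (node_num : Int) (fuel : Nat) (pref : List Int) : List (List Int) :=
  match fuel with
  | 0 => []
  | f + 1 =>
    let reset := node_num - pref.sum
    if reset = 1 then [pref ++ [1]]
    else (PySem.List.pyRange 1 reset 1).foldl
      (fun acc s => acc ++ shape_enumator_go node_num f (pref ++ [s])) []

def shape_enumator (node_num : Int) (last_shape_num_list : List Int) : List (List Int) :=
  shape_enumator_go node_num (node_num - last_shape_num_list.sum).toNat last_shape_num_list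

-- ===== PORT B =====
-- the while-stack loop of Source B; 'for slevel in reversed(range(1, remaining)): stack.append(...)'
-- is the reverse.foldl below (push = cons onto the stack's top); fuel only bounds the
-- iteration count to make the loop structural (2^remaining always suffices)
def shape_enumator_altLoop (node_num : Int) (fuel : Nat) (stack : List (List Int)) (out : List (List Int)) : List (List Int) :=
  match fuel, stack with
  | _, [] => out
  | 0, _ => out
  | f + 1, entry :: rest =>
    let remaining := node_num - entry.sum
    if remaining = 1 then
      shape_enumator_altLoop node_num f rest (out ++ [entry ++ [1]])
    else
      shape_enumator_altLoop node_num f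
        ((PySem.List.pyRange 1 remaining 1).reverse.foldl (fun st s => (entry ++ [s]) :: st) rest)
        out

def shape_enumator_alt (node_num : Int) (last_shape_num_list : List Int) : List (List Int) :=
  shape_enumator_altLoop node_num (2 ^ (node_num - last_shape_num_list.sum).toNat) [last_shape_num_list] []

-- ===== PRECONDITION & SPEC =====
-- Pre_ excludes exactly the inputs on which the Python assert fires (both A and B raise AssertionError there)
def Pre_shape_enumator (node_num : Int) (last_shape_num_list : List Int) : Prop :=
  0 < node_num - last_shape_num_list.sum
instance (node_num : Int) (last_shape_num_list : List Int) : Decidable (Pre_shape_enumator node_num last_shape_num_list) := by unfold Pre_shape_enumator; infer_instance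
def pvWitness_shape_enumator : Int × List Int := (4, [])

def Spec_shape_enumator (node_num : Int) (last_shape_num_list : List Int) (out : List (List Int)) : Prop := out = shape_enumator_alt node_num last_shape_num_list
instance (node_num : Int) (last_shape_num_list : List Int) (out : List (List Int)) : Decidable (Spec_shape_enumator node_num last_shape_num_list out) := by unfold Spec_shape_enumator; infer_instance

-- ===== CLAIM (what is proved, stated in full; the proofs are below) =====
def Claim_equal_shape_enumator : Prop := ∀ (node_num : Int) (last_shape_num_list : List Int), Dom_shape_enumator node_num last_shape_num_list → Pre_shape_enumator node_num last_shape_num_list → Spec_shape_enumator node_num last_shape_num_list (shape_enumator node_num last_shape_num_list)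

-- ===== LEMMAS AND PROOFS =====
theorem pvFoldlConsReverse {α β : Type} (f : α → β) (l : List α) (rest : List β) :
    l.reverse.foldl (fun st s => f s :: st) rest = l.map f ++ rest := by
  induction l generalizing rest with
  | nil => simp
  | cons a t ih => simp [List.foldl_append, ih]

theorem pvSumPow (n : Nat) : ((List.range n).map (fun k => 2 ^ (n - k))).sum + 2 = 2 ^ (n + 1) := by
  induction n with
  | zero => simp
  | succ n ih =>
    rw [List.range_succ, List.map_append]
    have hcg : (List.range n).map (fun k => 2 ^ (n + 1 - k)) = (List.range n).map (fun k => 2 ^ (n - k) * 2) := by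
      apply List.map_congr_left
      intro a ha
      have : a < n := List.mem_range.mp ha
      have : n + 1 - a = (n - a) + 1 := by omega
      rw [this, pow_succ]
    rw [hcg, List.sum_append, List.sum_map_mul_right]
    simp only [List.map_cons, List.map_nil, List.sum_cons, List.sum_nil]
    have h2 : n + 1 - n = 1 := by omega
    rw [h2]
    have := ih
    ring_nf
    ring_nf at this
    omega

theorem pvChildrenWeightLt (r : Int) :
    ((PySem.List.pyRange 1 r 1).map (fun s => 2 ^ (r - s).toNat)).sum < 2 ^ r.toNat := by
  by_cases hr : r ≤ 1
  · rw [PySem.List.pyRange_one_eq_nil (by omega)]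
    simp
  · push Not at hr
    rw [PySem.List.pyRange_one, List.map_map]
    have hn : r.toNat = (r - 1).toNat + 1 := by omega
    have hcg : ∀ a ∈ List.range (r - 1).toNat,
        ((fun s => 2 ^ (r - s).toNat) ∘ fun k : Nat => 1 + (k : Int)) a
        = (fun k => 2 ^ ((r - 1).toNat - k)) a := by
      intro a ha
      have := List.mem_range.mp ha
      simp only [Function.comp]
      congr 1
      omega
    rw [List.map_congr_left hcg, hn]
    have := pvSumPow (r - 1).toNat
    omega

-- A's fuel is irrelevant as long as it covers the remaining budget
theorem pvGoFuel (node_num : Int) : ∀ (f1 f2 : Nat) (pref : List Int),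
    node_num - pref.sum ≤ (f1 : Int) → node_num - pref.sum ≤ (f2 : Int) →
    shape_enumator_go node_num f1 pref = shape_enumator_go node_num f2 pref := by
  intro f1
  induction f1 with
  | zero =>
    intro f2 pref h1 h2
    have hempty : ∀ (g : Nat), node_num - pref.sum ≤ 0 → shape_enumator_go node_num g pref = [] := by
      intro g hg
      match g with
      | 0 => rfl
      | k + 1 =>
        rw [shape_enumator_go]
        rw [if_neg (by omega), PySem.List.pyRange_one_eq_nil (by omega)]
        rfl
    rw [hempty 0 (by exact_mod_cast h1), hempty f2 (by exact_mod_cast h1)]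
  | succ f ih =>
    intro f2 pref h1 h2
    by_cases hz : node_num - pref.sum ≤ 0
    · have hempty : ∀ (g : Nat), shape_enumator_go node_num g pref = [] := by
        intro g
        match g with
        | 0 => rfl
        | k + 1 =>
          rw [shape_enumator_go]
          rw [if_neg (by omega), PySem.List.pyRange_one_eq_nil (by omega)]
          rfl
      rw [hempty, hempty]
    · push Not at hz
      match f2 with
      | 0 => omega
      | g + 1 =>
        rw [shape_enumator_go, shape_enumator_go]
        by_cases h1' : node_num - pref.sum = 1
        · rw [if_pos h1', if_pos h1']
        · rw [if_neg h1', if_neg h1']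
          rw [PySem.List.foldl_append_eq_flatMap, PySem.List.foldl_append_eq_flatMap]
          simp only [List.nil_append, List.flatMap_def]
          apply congrArg
          apply List.map_congr_left
          intro a ha
          have hb := PySem.List.mem_pyRange_one.mp ha
          apply ih
          · simp only [List.sum_append, List.sum_cons, List.sum_nil]; omega
          · simp only [List.sum_append, List.sum_cons, List.sum_nil]; omega

-- one-step characterisation of A's recursion
theorem pvAeq (node_num : Int) (pref : List Int) :
    shape_enumator node_num pref =
      if node_num - pref.sum = 1 then [pref ++ [1]]
      else ((PySem.List.pyRange 1 (node_num - pref.sum) 1).map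
        (fun s => shape_enumator node_num (pref ++ [s]))).flatten := by
  unfold shape_enumator
  by_cases hz : node_num - pref.sum ≤ 0
  · rw [if_neg (by omega), PySem.List.pyRange_one_eq_nil (by omega)]
    have : (node_num - pref.sum).toNat = 0 := by omega
    rw [this]
    rfl
  · push Not at hz
    have hn : (node_num - pref.sum).toNat = ((node_num - pref.sum).toNat - 1) + 1 := by omega
    rw [hn, shape_enumator_go]
    by_cases h1 : node_num - pref.sum = 1
    · rw [if_pos h1, if_pos h1]
    · rw [if_neg h1, if_neg h1, PySem.List.foldl_append_eq_flatMap]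
      simp only [List.nil_append, List.flatMap_def]
      apply congrArg
      apply List.map_congr_left
      intro a ha
      have hb := PySem.List.mem_pyRange_one.mp ha
      apply pvGoFuel
      · simp only [List.sum_append, List.sum_cons, List.sum_nil]; omega
      · simp only [List.sum_append, List.sum_cons, List.sum_nil]; omega

-- stack-loop invariant: with enough fuel the loop emits, in order, A's result for every stacked prefix
theorem pvLoopInv (node_num : Int) : ∀ (fuel : Nat) (stack out : List (List Int)),
    (stack.map (fun e => 2 ^ (node_num - e.sum).toNat)).sum ≤ fuel →
    shape_enumator_altLoop node_num fuel stack out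
      = out ++ (stack.map (shape_enumator node_num)).flatten := by
  intro fuel
  induction fuel with
  | zero =>
    intro stack out h
    match stack with
    | [] => simp [shape_enumator_altLoop]
    | e :: rest =>
      exfalso
      simp only [List.map_cons, List.sum_cons] at h
      have := Nat.two_pow_pos (node_num - e.sum).toNat
      omega
  | succ f ih =>
    intro stack out h
    match stack with
    | [] => simp [shape_enumator_altLoop]
    | entry :: rest =>
      simp only [List.map_cons, List.sum_cons] at h
      rw [shape_enumator_altLoop]
      by_cases hr : node_num - entry.sum = 1
      · rw [if_pos hr]
        rw [ih rest _ (by rw [hr] at h; norm_num at h; omega)]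
        simp only [List.map_cons, List.flatten_cons]
        rw [pvAeq node_num entry, if_pos hr]
        simp
      · rw [if_neg hr]
        have hw := pvChildrenWeightLt (node_num - entry.sum)
        have hmap : ((PySem.List.pyRange 1 (node_num - entry.sum) 1).map
            ((fun e => 2 ^ (node_num - e.sum).toNat) ∘ fun s => entry ++ [s])).sum
            = ((PySem.List.pyRange 1 (node_num - entry.sum) 1).map
            (fun s => 2 ^ ((node_num - entry.sum) - s).toNat)).sum := by
          apply congrArg
          apply List.map_congr_left
          intro a _
          simp only [Function.comp, List.sum_append, List.sum_cons, List.sum_nil]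
          congr 2
          omega
        rw [ih _ out (by
          rw [pvFoldlConsReverse (fun s => entry ++ [s]), List.map_append, List.sum_append, List.map_map, hmap]
          omega)]
        rw [pvFoldlConsReverse (fun s => entry ++ [s]), List.map_append, List.flatten_append, List.map_map]
        simp only [List.map_cons, List.flatten_cons]
        rw [pvAeq node_num entry, if_neg hr]
        rfl

-- ===== VERDICT (by name: the statement is the Claim_ definition above) =====
theorem shape_enumator_spec : Claim_equal_shape_enumator := by
  intro node_num lst _ _
  unfold Spec_shape_enumator shape_enumator_alt
  rw [pvLoopInv node_num _ _ _ (by simp)]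
  simp
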